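-- pv_equiv track=rewrite | github.com/Adamp799/advent2025 | day06/part1/bgorithm.py | sum_of_problems
-- ===== SOURCE A (Python) =====
-- def sum_of_problems(problems):
--     total = 0
--
--     for i in range(len(problems[0])):
--         operation = problems[-1][i]
--         if operation == '+':
--             count = 0
--             for problem in problems[:-1]:
--                 count += int(problem[i])
--             total += count
--         else:
--             prod = 1
--             for problem in problems[:-1]:
--                 prod *= int(problem[i])
--             total += prod
--     return total
-- ===== SOURCE B (Python) =====
-- def sum_of_problems(problems):
--     *data, ops = problems
--     n = len(problems[0])
--     sums = [0] * n
--     prods = [1] * n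
--     for row in data:
--         for j in range(n):
--             v = int(row[j])
--             sums[j] += v
--             prods[j] *= v
--     total = 0
--     for s, p, op in zip(sums, prods, ops):
--         total += s if op == '+' else p
--     return total
-- ===== Notes on version B (the rewrite author's own statement) =====
-- stated objective: alternative
-- what changed: B replaces A's column-major nested loops (an inner scan of problems[:-1] per column index) with a row-major single pass that maintains per-column running sum and product accumulator arrays, followed by one final pass over the operator row selecting which accumulator to add.
import Mathlib
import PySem

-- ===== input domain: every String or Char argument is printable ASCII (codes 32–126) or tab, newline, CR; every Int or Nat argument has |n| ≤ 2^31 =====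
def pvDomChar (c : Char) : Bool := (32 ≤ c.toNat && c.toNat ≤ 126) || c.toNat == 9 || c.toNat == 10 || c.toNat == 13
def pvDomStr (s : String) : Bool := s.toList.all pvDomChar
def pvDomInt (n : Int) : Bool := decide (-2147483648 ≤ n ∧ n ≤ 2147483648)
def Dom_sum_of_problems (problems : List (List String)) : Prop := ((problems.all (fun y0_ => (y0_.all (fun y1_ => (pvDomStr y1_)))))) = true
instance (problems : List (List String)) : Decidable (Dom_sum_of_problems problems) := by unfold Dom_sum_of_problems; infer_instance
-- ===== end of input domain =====

-- B is a row-major single pass keeping per-column running sum/product arrays (plus a final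
-- pass over the operator row), instead of A's column-major nested loops; same return value
-- on Pre_ (objective: alternative).

-- ===== PORT A =====
-- literal port of A: loop over i in range(len(problems[0])); problems[-1][i]; inner folds
-- over problems[:-1].  Pre_ guarantees every index is in range and every int() succeeds,
-- so the `getD`s below never take their defaults on admitted inputs.
def sum_of_problems (problems : List (List String)) : Int :=
  (List.range (problems.headD []).length).foldl
    (fun total i =>
      let operation := (problems.getLastD []).getD i ""
      if operation = "+" then
        let count := problems.dropLast.foldl
          (fun count problem => count + ((PySem.Int.ofStr? (problem.getD i "")).getD 0)) 0
        total + count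
      else
        let prod := problems.dropLast.foldl
          (fun prod problem => prod * ((PySem.Int.ofStr? (problem.getD i "")).getD 0)) 1
        total + prod)
    0

-- ===== PORT B =====
-- literal port of Source B: *data, ops = problems; sums/prods arrays updated in-place per row
-- (list.set, as Python's sums[j] += v), then one pass over zip(sums, prods, ops).
def sum_of_problems_alt (problems : List (List String)) : Int :=
  let data := problems.dropLast
  let ops := problems.getLastD []
  let n := (problems.headD []).length
  let sp := data.foldl
    (fun sp row =>
      (List.range n).foldl
        (fun sp j =>
          let v := (PySem.Int.ofStr? (row.getD j "")).getD 0
          (sp.1.set j (sp.1.getD j 0 + v), sp.2.set j (sp.2.getD j 0 * v)))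
        sp)
    (List.replicate n 0, List.replicate n 1)
  (sp.1.zip (sp.2.zip ops)).foldl
    (fun total x => total + (if x.2.2 = "+" then x.1 else x.2.1)) 0

-- ===== PRECONDITION & SPEC =====
-- Pre_ = exactly the inputs where the Python A returns normally: the table is nonempty,
-- no row is shorter than row 0 (else IndexError), and every entry of a non-last row in the
-- first len(row0) columns parses as an int (else ValueError).
def Pre_sum_of_problems (problems : List (List String)) : Prop :=
  problems ≠ [] ∧
  (∀ row ∈ problems, (problems.headD []).length ≤ row.length) ∧
  (∀ row ∈ problems.dropLast, ∀ i < (problems.headD []).length,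
      (PySem.Int.ofStr? (row.getD i "")).isSome = true)
instance (problems : List (List String)) : Decidable (Pre_sum_of_problems problems) := by
  unfold Pre_sum_of_problems; infer_instance

def pvWitness_sum_of_problems : List (List String) :=
  [["5", "2"], ["3", "4"], ["+", "*"]]

def Spec_sum_of_problems (problems : List (List String)) (out : Int) : Prop := out = sum_of_problems_alt problems
instance (problems : List (List String)) (out : Int) : Decidable (Spec_sum_of_problems problems out) := by unfold Spec_sum_of_problems; infer_instance

-- ===== CLAIM =====
def Claim_equal_sum_of_problems : Prop := ∀ (problems : List (List String)), Dom_sum_of_problems problems → Pre_sum_of_problems problems → Spec_sum_of_problems problems (sum_of_problems problems)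

-- ===== LEMMAS AND PROOFS =====

-- a fold whose pair state updates component-wise splits into two folds
theorem foldl_pair_split {α β γ : Type} (f : β → α → β) (g : γ → α → γ) :
    ∀ (l : List α) (a : β) (b : γ),
      l.foldl (fun p x => (f p.1 x, g p.2 x)) (a, b) = (l.foldl f a, l.foldl g b) := by
  intro l
  induction l with
  | nil => intro a b; rfl
  | cons x xs ih => intro a b; simp [List.foldl_cons, ih]

-- the inner loop (set each index j < n once, from its old value) in closed form
theorem foldl_set_range (op : Int → Int → Int) (v : Nat → Int) :
    ∀ (n : Nat) (s : List Int), n ≤ s.length →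
      (List.range n).foldl (fun s j => s.set j (op (s.getD j 0) (v j))) s
        = ((List.range n).map (fun j => op (s.getD j 0) (v j))) ++ s.drop n := by
  intro n
  induction n with
  | zero => intro s _; simp
  | succ n ih =>
    intro s hlen
    rw [List.range_succ, List.foldl_append, ih s (by omega)]
    have hn : n < s.length := by omega
    have hM : ((List.range n).map (fun j => op (s.getD j 0) (v j))).length = n := by simp
    have hgetD : (((List.range n).map (fun j => op (s.getD j 0) (v j))) ++ s.drop n).getD n 0
        = s.getD n 0 := by
      rw [List.getD_eq_getElem?_getD,
        List.getElem?_append_right (by omega : ((List.range n).map (fun j => op (s.getD j 0) (v j))).length ≤ n),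
        hM]
      simp [List.getElem?_drop, List.getD]
    have hdrop : s.drop n = s.getD n 0 :: s.drop (n + 1) := by
      rw [List.drop_eq_getElem_cons hn]
      simp [List.getD, List.getElem?_eq_getElem hn]
    simp only [List.foldl_cons, List.foldl_nil, hgetD]
    rw [List.set_append]
    simp only [hM, Nat.lt_irrefl]
    rw [hdrop]
    simp [List.map_append]

-- the row pass in closed form: starting from (range n).map S, after folding all rows the
-- array at index j holds the column-j fold of op over the rows
theorem foldl_rows (n : Nat) (op : Int → Int → Int) (v : List String → Nat → Int) :
    ∀ (data : List (List String)) (S : Nat → Int),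
      data.foldl
        (fun s row => (List.range n).foldl (fun s j => s.set j (op (s.getD j 0) (v row j))) s)
        ((List.range n).map S)
      = (List.range n).map (fun j => data.foldl (fun a row => op a (v row j)) (S j)) := by
  intro data
  induction data with
  | nil => intro S; rfl
  | cons row rest ih =>
    intro S
    rw [List.foldl_cons]
    have hstep : (List.range n).foldl
        (fun s j => s.set j (op (s.getD j 0) (v row j))) ((List.range n).map S)
        = (List.range n).map (fun j => op (S j) (v row j)) := by
      rw [foldl_set_range (op := op) (v := fun j => v row j) n ((List.range n).map S) (by simp)]
      have : ∀ j ∈ List.range n, op (((List.range n).map S).getD j 0) (v row j)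
          = op (S j) (v row j) := by
        intro j hj
        have hj' : j < n := List.mem_range.mp hj
        congr 1
        simp [List.getD, List.getElem?_map, List.getElem?_range hj']
      rw [List.map_congr_left this]
      simp [List.drop_eq_nil_of_le]
    rw [hstep, ih]
    rfl

-- zip truncates its second argument at the first's length
theorem zip_take_len {α β : Type} : ∀ (l₁ : List α) (l₂ : List β),
    l₁.zip l₂ = l₁.zip (l₂.take l₁.length) := by
  intro l₁
  induction l₁ with
  | nil => intro l₂; simp
  | cons x xs ih =>
    intro l₂
    cases l₂ with
    | nil => simp
    | cons y ys => simp [List.zip_cons_cons, ih ys]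

-- a prefix of a long-enough list, written as getD over range
theorem take_eq_map_range (ops : List String) (n : Nat) (h : n ≤ ops.length) :
    ops.take n = (List.range n).map (fun j => ops.getD j "") := by
  apply List.ext_getElem
  · simp; omega
  · intro i h1 h2
    have hi : i < n := by simp at h1; omega
    have hi' : i < ops.length := by omega
    simp [List.getD, List.getElem?_eq_getElem hi']

-- ===== VERDICT =====
theorem sum_of_problems_spec : Claim_equal_sum_of_problems := by
  intro problems _ hpre
  obtain ⟨hne, hlen, _⟩ := hpre
  show sum_of_problems problems = sum_of_problems_alt problems
  unfold sum_of_problems sum_of_problems_alt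
  simp only []
  set n := (problems.headD []).length with hn
  set data := problems.dropLast with hdata
  set ops := problems.getLastD [] with hops
  set v : List String → Nat → Int := fun row j => (PySem.Int.ofStr? (row.getD j "")).getD 0 with hv
  -- the inner pair-state loop splits component-wise
  have hstepfun : (fun (sp : List Int × List Int) (row : List String) =>
      (List.range n).foldl
        (fun sp j => (sp.1.set j (sp.1.getD j 0 + v row j), sp.2.set j (sp.2.getD j 0 * v row j)))
        sp)
      = (fun sp row =>
        ((List.range n).foldl (fun s j => s.set j (s.getD j 0 + v row j)) sp.1,
         (List.range n).foldl (fun s j => s.set j (s.getD j 0 * v row j)) sp.2)) := by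
    funext sp row
    conv_lhs => rw [← Prod.mk.eta (p := sp)]
    exact foldl_pair_split (fun s j => s.set j (s.getD j 0 + v row j))
      (fun s j => s.set j (s.getD j 0 * v row j)) (List.range n) sp.1 sp.2
  rw [hstepfun]
  have houter : List.foldl
      (fun (sp : List Int × List Int) row =>
        ((List.range n).foldl (fun s j => s.set j (s.getD j 0 + v row j)) sp.1,
         (List.range n).foldl (fun s j => s.set j (s.getD j 0 * v row j)) sp.2))
      (List.replicate n 0, List.replicate n 1) data
      = (List.foldl (fun s row => (List.range n).foldl (fun s j => s.set j (s.getD j 0 + v row j)) s) (List.replicate n 0) data,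
         List.foldl (fun s row => (List.range n).foldl (fun s j => s.set j (s.getD j 0 * v row j)) s) (List.replicate n 1) data) :=
    foldl_pair_split
      (fun s row => (List.range n).foldl (fun s j => s.set j (s.getD j 0 + v row j)) s)
      (fun s row => (List.range n).foldl (fun s j => s.set j (s.getD j 0 * v row j)) s)
      data (List.replicate n 0) (List.replicate n 1)
  rw [houter]
  -- closed forms for the two accumulator arrays
  have hrepl0 : (List.replicate n (0:Int)) = (List.range n).map (fun _ => (0:Int)) := by
    simp [List.map_const']
  have hrepl1 : (List.replicate n (1:Int)) = (List.range n).map (fun _ => (1:Int)) := by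
    simp [List.map_const']
  rw [hrepl0, hrepl1,
    foldl_rows n (· + ·) v data (fun _ => 0),
    foldl_rows n (· * ·) v data (fun _ => 1)]
  -- ops is long enough
  have hopsn : n ≤ ops.length := by
    obtain ⟨a, ha⟩ := Option.isSome_iff_exists.mp (List.getLast?_isSome.mpr hne)
    have hmem : ops ∈ problems := by
      rw [hops, List.getLastD_eq_getLast?, ha]
      exact List.mem_of_getLast? ha
    exact hlen _ hmem
  dsimp only
  rw [zip_take_len ((List.range n).map (fun j => List.foldl (fun a row => a * v row j) 1 data)) ops,
    List.length_map, List.length_range, take_eq_map_range ops n hopsn,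
    List.zip_map', List.zip_map', List.foldl_map]
  -- both sides are now folds over range n with pointwise-equal bodies
  apply PySem.List.foldl_congr_mem
  intro total i _
  simp only []
  split_ifs <;> rfl
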